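-- pv_equiv track=rewrite | github.com/ryuckel/pjt-euler | euler.py | triangle_numbers
-- ===== SOURCE A (Python) =====
-- def triangle_numbers(threshold):
--     n = 1
--     tn = []
--     while True:
--         num = n * (n + 1) // 2
--         if num > threshold:
--             return tn
--         tn.append(num)
--         n += 1
-- ===== SOURCE B (Python) =====
-- def _isqrt(n):
--     # Newton's method integer square root (floor), for n >= 1
--     x = n
--     y = (x + 1) // 2
--     while y < x:
--         x = y
--         y = (x + n // x) // 2
--     return x
--
--
-- def triangle_numbers(threshold):
--     if threshold < 1:
--         return []
--     # k = largest n with n*(n+1)//2 <= threshold, in closed form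
--     k = (_isqrt(8 * threshold + 1) - 1) // 2
--     return [i * (i + 1) // 2 for i in range(1, k + 1)]
-- ===== Notes on version B (the rewrite author's own statement) =====
-- stated objective: alternative
-- what changed: B replaces A's scan-until-exceed loop entirely: it computes the count k of triangular numbers <= threshold in closed form via a hand-written Newton integer square root (k = (isqrt(8t+1)-1)//2) and then builds the list directly with a comprehension over range(1, k+1).
import Mathlib
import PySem

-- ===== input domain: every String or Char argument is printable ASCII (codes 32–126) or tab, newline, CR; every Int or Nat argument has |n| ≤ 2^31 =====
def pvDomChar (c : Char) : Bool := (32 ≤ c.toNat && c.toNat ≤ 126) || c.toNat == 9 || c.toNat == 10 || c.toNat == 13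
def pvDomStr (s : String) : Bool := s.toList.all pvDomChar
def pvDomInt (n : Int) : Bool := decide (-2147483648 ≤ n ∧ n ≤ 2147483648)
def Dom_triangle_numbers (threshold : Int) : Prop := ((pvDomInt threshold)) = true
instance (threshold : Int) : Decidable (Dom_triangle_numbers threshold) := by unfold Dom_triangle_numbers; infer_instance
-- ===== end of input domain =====

-- B replaces A's scan-until-exceed loop by a closed-form count (Newton integer
-- square root, k = (isqrt(8t+1)-1)//2) followed by a direct list build; objective: alternative.

-- ===== PORT A =====
-- termination helper for A's loop: the closed-form value is at least n
theorem pv_tri_ge (n : Int) : n ≤ PySem.Int.floordiv (n * (n + 1)) 2 := by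
  by_cases h : n ≤ 0
  · have : 0 ≤ PySem.Int.floordiv (n * (n + 1)) 2 := by
      rw [PySem.Int.le_floordiv_iff_mul_le (by omega)]
      by_cases h0 : n = 0
      · simp [h0]
      · nlinarith [mul_nonneg (by omega : (0:Int) ≤ -n) (by omega : (0:Int) ≤ -(n + 1))]
    omega
  · have h1 : 1 ≤ n := by omega
    rw [PySem.Int.le_floordiv_iff_mul_le (by omega)]
    nlinarith

def triangle_numbers_go (threshold n : Int) (tn : List Int) : List Int :=
  let num := PySem.Int.floordiv (n * (n + 1)) 2
  if num > threshold then tn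
  else triangle_numbers_go threshold (n + 1) (tn ++ [num])
termination_by (threshold + 1 - n).toNat
decreasing_by
  have := pv_tri_ge n
  simp only [not_lt] at *
  omega

def triangle_numbers (threshold : Int) : List Int :=
  triangle_numbers_go threshold 1 []

-- ===== PORT B =====
-- _isqrt's Newton loop; its arguments in Source B are always nonnegative ints, so it is
-- ported over Nat (Nat division = Python floor division on nonnegative operands; exact there)
def pvIsqrtGo (n x y : Nat) : Nat :=
  if y < x then pvIsqrtGo n y ((y + n / y) / 2) else x
termination_by x

def pvIsqrt (n : Nat) : Nat :=
  pvIsqrtGo n n ((n + 1) / 2)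

def triangle_numbers_alt (threshold : Int) : List Int :=
  if threshold < 1 then []
  else
    let k := PySem.Int.floordiv ((pvIsqrt (8 * threshold + 1).toNat : Int) - 1) 2
    (PySem.List.pyRange 1 (k + 1) 1).map (fun i => PySem.Int.floordiv (i * (i + 1)) 2)

-- ===== PRECONDITION & SPEC =====
def Spec_triangle_numbers (threshold : Int) (out : List Int) : Prop := out = triangle_numbers_alt threshold
instance (threshold : Int) (out : List Int) : Decidable (Spec_triangle_numbers threshold out) := by unfold Spec_triangle_numbers; infer_instance

-- ===== CLAIM (what is proved, stated in full; the proofs are below) =====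
def Claim_equal_triangle_numbers : Prop := ∀ (threshold : Int), Dom_triangle_numbers threshold → Spec_triangle_numbers threshold (triangle_numbers threshold)

-- ===== LEMMAS AND PROOFS =====

-- the Newton loop is core's Nat.sqrt.iter
theorem pv_isqrtGo_eq_iter (n : Nat) : ∀ x, pvIsqrtGo n x ((x + n / x) / 2) = Nat.sqrt.iter n x := by
  intro x
  fun_induction Nat.sqrt.iter n x with
  | case1 x next h ih =>
      rw [pvIsqrtGo]
      simp only [show ((x + n / x) / 2) < x from h]
      simpa using ih
  | case2 x next h =>
      rw [pvIsqrtGo]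
      simp [show ¬ ((x + n / x) / 2) < x from h]

theorem pv_isqrt_spec (n : Nat) (hn : 1 ≤ n) :
    pvIsqrt n * pvIsqrt n ≤ n ∧ n < (pvIsqrt n + 1) * (pvIsqrt n + 1) := by
  have hstart : pvIsqrt n = Nat.sqrt.iter n n := by
    unfold pvIsqrt
    have : (n + 1) / 2 = (n + n / n) / 2 := by
      rw [Nat.div_self hn]
    rw [this, pv_isqrtGo_eq_iter]
  constructor
  · rw [hstart]; exact Nat.sqrt.iter_sq_le n n
  · rw [hstart]; exact Nat.sqrt.lt_iter_succ_sq n n (by nlinarith)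

theorem pv_floordiv_two (a q : Int) (h1 : q * 2 ≤ a) (h2 : a < (q + 1) * 2) :
    PySem.Int.floordiv a 2 = q := by
  rw [PySem.Int.floordiv_eq_iff_of_pos (by omega)]
  omega

theorem pv_tri_even (n : Int) : ∃ m, n * (n + 1) = 2 * m := by
  rcases Int.even_or_odd n with ⟨m, hm⟩ | ⟨m, hm⟩
  · exact ⟨m * (n + 1), by rw [hm]; ring⟩
  · exact ⟨n * (m + 1), by rw [hm]; ring⟩

-- A's loop, characterised: starting at n ≥ 1 it appends exactly the triangular
-- numbers T n .. T k, where k is pinned by k(k+1) ≤ 2t < (k+1)(k+2)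
theorem pv_go_char (t k : Int) (hk1 : k * (k + 1) ≤ 2 * t) (hk2 : 2 * t < (k + 1) * (k + 2)) :
    ∀ (n : Int) (tn : List Int), 1 ≤ n →
      triangle_numbers_go t n tn =
        tn ++ (PySem.List.pyRange n (k + 1) 1).map (fun i => PySem.Int.floordiv (i * (i + 1)) 2) := by
  intro n tn
  fun_induction triangle_numbers_go t n tn with
  | case1 n tn num h =>
      intro h1
      obtain ⟨m, hm⟩ := pv_tri_even n
      have hnum : num = m := pv_floordiv_two _ _ (by omega) (by omega)
      -- num > t forces n > k
      have hnk : k + 1 ≤ n := by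
        by_contra hc
        rw [not_le] at hc
        have : n * (n + 1) ≤ k * (k + 1) := by nlinarith
        omega
      rw [PySem.List.pyRange_one_eq_nil (by omega)]
      simp
  | case2 n tn num h ih =>
      intro h1
      obtain ⟨m, hm⟩ := pv_tri_even n
      have hnum : num = m := pv_floordiv_two _ _ (by omega) (by omega)
      simp only [not_lt] at h
      -- num ≤ t forces n ≤ k
      have hnk : n < k + 1 := by
        by_contra hc
        rw [not_lt] at hc
        have : (k + 1) * (k + 2) ≤ n * (n + 1) := by nlinarith
        omega
      rw [PySem.List.pyRange_one_cons hnk, List.map_cons]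
      rw [ih (by omega)]
      simp only [List.append_assoc, List.singleton_append]
      rfl

theorem pv_k_bounds (t r k : Int) (hr0 : 0 ≤ r)
    (hs1 : r * r ≤ 8 * t + 1) (hs2 : 8 * t + 1 < (r + 1) * (r + 1))
    (hkb1 : k * 2 ≤ r - 1) (hkb2 : r - 1 < (k + 1) * 2) :
    k * (k + 1) ≤ 2 * t ∧ 2 * t < (k + 1) * (k + 2) := by
  constructor
  · nlinarith [sq_nonneg (r - 2 * k - 1), sq_nonneg (r - 2 * k - 2)]
  · nlinarith [sq_nonneg (r - 2 * k - 1), sq_nonneg (r - 2 * k - 2)]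

-- ===== VERDICT (by name: the statement is the Claim_ definition above) =====
theorem triangle_numbers_spec : Claim_equal_triangle_numbers := by
  intro t _
  unfold Spec_triangle_numbers triangle_numbers triangle_numbers_alt
  by_cases ht : t < 1
  · simp only [ht, if_true]
    rw [triangle_numbers_go]
    simp [show (1 : Int) > t by omega]
  · simp only [ht, if_false]
    rw [not_lt] at ht
    have hcast : ((8 * t + 1).toNat : Int) = 8 * t + 1 := by omega
    obtain ⟨hs1, hs2⟩ := pv_isqrt_spec (8 * t + 1).toNat (by omega)
    have hs1' : ((pvIsqrt (8 * t + 1).toNat : Nat) : Int) * ((pvIsqrt (8 * t + 1).toNat : Nat) : Int) ≤ 8 * t + 1 := by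
      rw [← hcast]; exact_mod_cast hs1
    have hs2' : 8 * t + 1 < (((pvIsqrt (8 * t + 1).toNat : Nat) : Int) + 1) * (((pvIsqrt (8 * t + 1).toNat : Nat) : Int) + 1) := by
      rw [← hcast]; exact_mod_cast hs2
    have hkb1 : PySem.Int.floordiv (((pvIsqrt (8 * t + 1).toNat : Nat) : Int) - 1) 2 * 2 ≤ ((pvIsqrt (8 * t + 1).toNat : Nat) : Int) - 1 :=
      (PySem.Int.le_floordiv_iff_mul_le (by omega)).mp le_rfl
    have hkb2 : ((pvIsqrt (8 * t + 1).toNat : Nat) : Int) - 1 < (PySem.Int.floordiv (((pvIsqrt (8 * t + 1).toNat : Nat) : Int) - 1) 2 + 1) * 2 :=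
      (PySem.Int.floordiv_lt_iff_lt_mul (by omega)).mp (by omega)
    obtain ⟨hk1, hk2⟩ := pv_k_bounds t _ _ (by positivity) hs1' hs2' hkb1 hkb2
    simpa using pv_go_char t _ hk1 hk2 1 [] (by omega)
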